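-- pv_equiv track=rewrite | github.com/youhavetopay/Algorithm | Programmers/2017 팁스타운/짝지어 제거하기.py | solution
-- ===== SOURCE A (Python) =====
-- def solution(s):
--
--     '''
--         나의 풀이
--
--         나의 접근법
--         스택을 사용해서 이전문자열이랑 같으면 빼주면서
--         반복하였음
--
--         스택에 담고 다음번에는 해당 스택을 다시 새로운 스택을 사용해서
--         이전과 같은 로직을 하고
--
--         스택이 모두 비워졌다면 모든 문자를 제거한 것
--         만약 이전 스택이랑 현재 스택이랑 길이가 같다면 -> 붙어있는 같은 문자가 없음
--         문자를 제거할 수 없는 상태로 했음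
--
--         이러니까 풀림 ㅋㅋㅋ
--
--         솔직히 시간복잡도에서 걸릴 줄 알았는데
--         생각보다 쉽게 통과해서 의야 했음
--
--         보니까 이전에 풀어둔 것도 있는데 확인해 봐야겠다 ㅋㅋㅋ
--     '''
--
--     last_stack = s
--
--     while True:
--         stack = []
--
--         for word in last_stack:
--             if stack and stack[-1] == word:
--                 stack.pop()
--             else:
--                 stack.append(word)
--
--         if stack == []:
--             return 1
--
--         if len(last_stack) == len(stack):
--             return 0
--
--         last_stack = stack
-- ===== SOURCE B (Python) =====
-- def solution(s):
--     stack = []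
--     for c in s:
--         if stack and stack[-1] == c:
--             stack.pop()
--         else:
--             stack.append(c)
--     return 1 if not stack else 0
-- ===== Notes on version B (the rewrite author's own statement) =====
-- stated objective: simpler
-- what changed: Replaces A's outer while-loop of repeated whole-string stack passes (rerun until the stack empties or stops shrinking) with a single stack pass, returning 1 iff the final stack is empty; one pass already fully cancels adjacent pairs, so A's loop does at most two passes and no speed-up is claimed.
import Mathlib
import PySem

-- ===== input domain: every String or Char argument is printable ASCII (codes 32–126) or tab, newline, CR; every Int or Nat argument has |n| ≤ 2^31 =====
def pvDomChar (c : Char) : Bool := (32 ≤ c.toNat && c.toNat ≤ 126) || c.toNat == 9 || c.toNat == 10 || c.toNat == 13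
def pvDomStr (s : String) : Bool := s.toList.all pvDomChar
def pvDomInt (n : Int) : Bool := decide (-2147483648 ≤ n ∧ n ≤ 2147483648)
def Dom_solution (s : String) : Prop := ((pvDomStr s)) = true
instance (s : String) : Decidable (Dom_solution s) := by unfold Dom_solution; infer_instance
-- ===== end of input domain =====

-- B: a single stack pass instead of A's outer loop of repeated passes; simpler, same result (no speed claim).

-- ===== PORT A =====
-- one body of A's for-loop: stack[-1] is the last element, pop/append act at the end
def solStepA (stack : List Char) (word : Char) : List Char :=
  if stack.getLast? = some word then stack.dropLast else stack ++ [word]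

-- one full pass 'for word in last_stack: …' starting from stack = []
def solPassA (l : List Char) : List Char := l.foldl solStepA []

-- a single step changes the stack length by one
theorem solStepA_len (stack : List Char) (c : Char) :
    (solStepA stack c).length ≤ stack.length + 1 := by
  unfold solStepA
  split
  · simp only [List.length_dropLast]; omega
  · simp

theorem solPassA_len_aux (l : List Char) (s : List Char) :
    (l.foldl solStepA s).length ≤ s.length + l.length := by
  induction l generalizing s with
  | nil => simp
  | cons c t ih =>
    have h1 := ih (solStepA s c)
    have h2 := solStepA_len s c
    simpa [List.foldl] using le_trans h1 (by omega)

-- the stack a pass produces is at most as long as its input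
theorem solPassA_len (l : List Char) : (solPassA l).length ≤ l.length := by
  simpa [solPassA] using solPassA_len_aux l []

-- A's 'while True' loop: pass, return 1 on empty, 0 on no progress, else loop on the new stack
def solLoopA (last_stack : List Char) : Int :=
  if solPassA last_stack = [] then 1
  else if last_stack.length = (solPassA last_stack).length then 0
  else solLoopA (solPassA last_stack)
termination_by last_stack.length
decreasing_by
  have := solPassA_len last_stack
  omega

def solution (s : String) : Int := solLoopA s.toList

-- ===== PORT B =====
-- B's stack is built with cons: the head is the top
def solStepB (stack : List Char) (c : Char) : List Char :=
  if stack.head? = some c then stack.tail else c :: stack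

def solution_alt (s : String) : Int :=
  if s.toList.foldl solStepB [] = [] then 1 else 0

-- ===== PRECONDITION & SPEC =====
def Spec_solution (s : String) (out : Int) : Prop := out = solution_alt s
instance (s : String) (out : Int) : Decidable (Spec_solution s out) := by unfold Spec_solution; infer_instance

-- ===== CLAIM (what is proved, stated in full; the proofs are below) =====
def Claim_equal_solution : Prop := ∀ (s : String), Dom_solution s → Spec_solution s (solution s)

-- ===== LEMMAS AND PROOFS =====

-- B's cons-stack is the reverse of A's append-stack at every step
theorem solStepB_rev (s : List Char) (c : Char) :
    solStepB s.reverse c = (solStepA s c).reverse := by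
  unfold solStepA solStepB
  rcases eq_or_ne s.getLast? (some c) with h | h
  · simp [h, List.head?_reverse, List.tail_reverse]
  · simp [h, List.head?_reverse]

theorem solPassB_rev_aux (l : List Char) (s : List Char) :
    l.foldl solStepB s.reverse = (l.foldl solStepA s).reverse := by
  induction l generalizing s with
  | nil => simp
  | cons c t ih => simpa [List.foldl, solStepB_rev] using ih (solStepA s c)

theorem solPassB_rev (l : List Char) :
    l.foldl solStepB [] = (solPassA l).reverse := by
  simpa [solPassA] using solPassB_rev_aux l ([] : List Char)

-- a pass preserves 'no two adjacent equal characters'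
theorem solStepA_chain (s : List Char) (c : Char) (h : s.IsChain (· ≠ ·)) :
    (solStepA s c).IsChain (· ≠ ·) := by
  unfold solStepA
  split
  · exact h.dropLast
  · next hne =>
    rw [List.isChain_append]
    refine ⟨h, List.isChain_singleton _, ?_⟩
    intro x hx y hy
    simp at hy
    subst hy
    intro hxy
    exact hne (hx ▸ hxy ▸ rfl)

theorem solPassA_chain_aux (l : List Char) (s : List Char) (h : s.IsChain (· ≠ ·)) :
    (l.foldl solStepA s).IsChain (· ≠ ·) := by
  induction l generalizing s with
  | nil => simpa using h
  | cons c t ih => exact ih _ (solStepA_chain s c h)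

theorem solPassA_chain (l : List Char) : (solPassA l).IsChain (· ≠ ·) := by
  exact solPassA_chain_aux l [] (by simp)

-- a pass over an already fully reduced list is the identity
theorem solPassA_fixed_aux (t : List Char) (s : List Char)
    (h : (s ++ t).IsChain (· ≠ ·)) : t.foldl solStepA s = s ++ t := by
  induction t generalizing s with
  | nil => simp
  | cons c t' ih =>
    have hlast : s.getLast? ≠ some c := by
      intro hl
      exact (List.isChain_append.mp h).2.2 c hl c rfl rfl
    have hstep : solStepA s c = s ++ [c] := by
      unfold solStepA; simp [hlast]
    have h' : ((s ++ [c]) ++ t').IsChain (· ≠ ·) := by simpa using h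
    simpa [List.foldl, hstep] using ih (s ++ [c]) h'

theorem solPassA_fixed (l : List Char) (h : l.IsChain (· ≠ ·)) :
    solPassA l = l := by
  simpa [solPassA] using solPassA_fixed_aux l [] (by simpa using h)

-- A's loop returns 1 exactly when a single pass empties the stack
theorem solLoopA_eq (l : List Char) :
    solLoopA l = if solPassA l = [] then 1 else 0 := by
  rw [solLoopA.eq_def]
  split
  · simp_all
  · next hne =>
    split
    · simp_all
    · next hlen =>
      rw [solLoopA.eq_def]
      have hfix : solPassA (solPassA l) = solPassA l :=
        solPassA_fixed _ (solPassA_chain l)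
      simp [hfix, hne]

-- ===== VERDICT (by name: the statement is the Claim_ definition above) =====
theorem solution_spec : Claim_equal_solution := by
  intro s _
  unfold Spec_solution solution solution_alt
  rw [solLoopA_eq, solPassB_rev]
  rcases eq_or_ne (solPassA s.toList) [] with h | h <;> simp [h]
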